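-- pv_equiv track=rewrite | github.com/Dodo-alone/ShortCord.ai | bot/utils/text_utils.py | find_best_split_point
-- ===== SOURCE A (Python) =====
-- def find_best_split_point(text: str, max_length: int) -> int:
--     """
--     Find the best point to split text, prioritizing different break types.
--
--     Returns the index where to split, or -1 if no good split point found.
--     """
--     if len(text) <= max_length:
--         return len(text)
--
--     # Define split points in order of preference (best to worst)
--     split_patterns = [
--         '\n\n',
--         '. ',
--         '.\n',
--         '! ',
--         '?\n',
--         '? ',
--         '!\n',
--         '\n',
--         '; ',
--         ', ',
--         ' - ',
--         ' ',
--     ]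
--
--     for pattern in split_patterns:
--         # Find all occurrences of this pattern within the valid range
--         search_text = text[:max_length]
--         last_occurrence = search_text.rfind(pattern)
--
--         if last_occurrence != -1:
--             # Return position after the pattern
--             return last_occurrence + len(pattern)
--
--     # No good split point found
--     return -1
-- ===== SOURCE B (Python) =====
-- def find_best_split_point(text: str, max_length: int) -> int:
--     """Single reverse scan over positions, keeping the best (rank, end) match."""
--     n = len(text)
--     if n <= max_length:
--         return n
--     patterns = ['\n\n', '. ', '.\n', '! ', '?\n', '? ', '!\n', '\n', '; ', ', ', ' - ', ' ']
--     m = len(text[:max_length])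
--     best_rank, best_end = len(patterns), -1
--     for i in range(m - 1, -1, -1):
--         for r, p in enumerate(patterns):
--             if r >= best_rank:
--                 break
--             if i + len(p) <= m and text.startswith(p, i):
--                 best_rank, best_end = r, i + len(p)
--                 break
--     return best_end
-- ===== Notes on version B (the rewrite author's own statement) =====
-- stated objective: alternative
-- what changed: A does one rfind pass over the prefix per pattern in preference order; B does a single reverse scan over positions of the prefix, tracking the best (rank, end) match with an early inner break, so pattern preference is resolved per position instead of per pass.
import Mathlib
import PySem

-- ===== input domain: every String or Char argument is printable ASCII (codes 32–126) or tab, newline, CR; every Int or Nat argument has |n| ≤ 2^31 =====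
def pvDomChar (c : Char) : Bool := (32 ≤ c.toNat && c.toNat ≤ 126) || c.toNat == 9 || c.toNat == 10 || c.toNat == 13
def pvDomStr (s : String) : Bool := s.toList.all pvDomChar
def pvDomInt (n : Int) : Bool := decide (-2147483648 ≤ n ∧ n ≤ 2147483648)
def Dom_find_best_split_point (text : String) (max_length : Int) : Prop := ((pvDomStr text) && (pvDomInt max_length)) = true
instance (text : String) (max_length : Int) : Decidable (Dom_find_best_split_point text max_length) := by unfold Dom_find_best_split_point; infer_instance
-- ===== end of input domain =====

-- B replaces A's per-pattern rfind passes by a single reverse scan over positions tracking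
-- the best (rank, end) match; same return value, alternative algorithm (no speed claim).

-- the split_patterns literal, shared data of both sources
def splitPatterns : List (List Char) :=
  [['\n', '\n'], ['.', ' '], ['.', '\n'], ['!', ' '], ['?', '\n'], ['?', ' '],
   ['!', '\n'], ['\n'], [';', ' '], [',', ' '], [' ', '-', ' '], [' ']]

-- ===== PORT A =====
-- the 'for pattern in split_patterns' loop: first pattern whose rfind in text[:max_length] hits
def findLoopA (text : List Char) (max_length : Int) : List (List Char) → Int
  | [] => -1
  | p :: rest =>
      let search_text := PySem.List.slice text none (some max_length)
      let last_occurrence := PySem.Chars.rfind search_text p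
      if last_occurrence ≠ -1 then last_occurrence + (p.length : Int)
      else findLoopA text max_length rest

def find_best_split_point (text : String) (max_length : Int) : Int :=
  if (text.toList.length : Int) ≤ max_length then (text.toList.length : Int)
  else findLoopA text.toList max_length splitPatterns

-- ===== PORT B =====
-- inner 'for r, p in enumerate(patterns)' with the two breaks; r is the enumerate counter.
-- text.startswith(p, i) for 0 ≤ i is ported exactly as p.isPrefixOf (t.drop i).
def altInner (t : List Char) (m i : Nat) : Nat → List (List Char) → Int × Int → Int × Int
  | _, [], st => st
  | r, p :: rest, (br, be) =>
      if br ≤ (r : Int) then (br, be)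
      else if i + p.length ≤ m ∧ p.isPrefixOf (t.drop i) then ((r : Int), (i : Int) + (p.length : Int))
      else altInner t m i (r + 1) rest (br, be)

-- outer 'for i in range(m - 1, -1, -1)': argument i+1 processes position i next
def altScan (t : List Char) (m : Nat) : Nat → Int × Int → Int × Int
  | 0, st => st
  | i + 1, st => altScan t m i (altInner t m i 0 splitPatterns st)

def find_best_split_point_alt (text : String) (max_length : Int) : Int :=
  if (text.toList.length : Int) ≤ max_length then (text.toList.length : Int)
  else
    let t := text.toList
    let m := (PySem.List.slice t none (some max_length)).length
    (altScan t m m ((splitPatterns.length : Int), -1)).2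

-- ===== PRECONDITION & SPEC =====
def Spec_find_best_split_point (text : String) (max_length : Int) (out : Int) : Prop := out = find_best_split_point_alt text max_length
instance (text : String) (max_length : Int) (out : Int) : Decidable (Spec_find_best_split_point text max_length out) := by unfold Spec_find_best_split_point; infer_instance

-- ===== CLAIM (what is proved, stated in full; the proofs are below) =====
def Claim_equal_find_best_split_point : Prop := ∀ (text : String) (max_length : Int), Dom_find_best_split_point text max_length → Spec_find_best_split_point text max_length (find_best_split_point text max_length)

-- ===== LEMMAS AND PROOFS =====

-- largest j < i at which p occurs in s, the common reference for both sides
def lastMatchBelow (s p : List Char) : Nat → Option Nat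
  | 0 => none
  | j + 1 => if p.isPrefixOf (s.drop j) then some j else lastMatchBelow s p j

def optIdx : Option Nat → Int
  | some j => (j : Int)
  | none => -1

-- reference value: scan patterns in order, first with a match below i wins at its last match
def altSpec (s : List Char) (i : Nat) : List (List Char) → Int → Int
  | [], be => be
  | p :: rest, be =>
      match lastMatchBelow s p i with
      | some j => (j : Int) + (p.length : Int)
      | none => altSpec s i rest be

-- first pattern (with its enumerate rank) matching at position i
def scanAt (t : List Char) (m i : Nat) : List (List Char) → Nat → Option (Nat × List Char)
  | [], _ => none
  | p :: rest, r =>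
      if i + p.length ≤ m ∧ p.isPrefixOf (t.drop i) then some (r, p)
      else scanAt t m i rest (r + 1)

theorem rfind_go_eq (s p : List Char) (k : Nat) :
    PySem.Chars.rfind.go s p k = optIdx (lastMatchBelow s p (k + 1)) := by
  induction k with
  | zero =>
      simp only [PySem.Chars.rfind.go, lastMatchBelow]
      split <;> simp_all [optIdx]
  | succ j ih =>
      unfold PySem.Chars.rfind.go
      rw [show lastMatchBelow s p (j + 1 + 1) =
        (if p.isPrefixOf (s.drop (j + 1)) then some (j + 1) else lastMatchBelow s p (j + 1)) from rfl]
      split <;> simp [optIdx, ih]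

theorem rfind_eq_lmb (s p : List Char) (hp : p ≠ []) :
    PySem.Chars.rfind s p = optIdx (lastMatchBelow s p s.length) := by
  unfold PySem.Chars.rfind
  rw [rfind_go_eq]
  have hnp : ¬ p.isPrefixOf (s.drop s.length) = true := by
    rw [List.isPrefixOf_iff_prefix, List.drop_length]
    exact fun hc => hp (List.prefix_nil.mp hc)
  rw [show lastMatchBelow s p (s.length + 1) =
    (if p.isPrefixOf (s.drop s.length) then some s.length else lastMatchBelow s p s.length) from rfl]
  rw [if_neg hnp]

theorem altSpec_zero (s : List Char) (l : List (List Char)) (be : Int) :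
    altSpec s 0 l be = be := by
  induction l with
  | nil => rfl
  | cons p rest ih => simp [altSpec, lastMatchBelow, ih]

-- bridge: B's test at position i ≤ m equals "p occurs at i in the prefix t.take m"
theorem cond_bridge (t p : List Char) (m i : Nat) (hi : i ≤ m) :
    (i + p.length ≤ m ∧ p.isPrefixOf (t.drop i)) ↔ p <+: (t.take m).drop i := by
  rw [List.isPrefixOf_iff_prefix, List.drop_take, List.prefix_take_iff]
  constructor
  · rintro ⟨h1, h2⟩; exact ⟨h2, by omega⟩
  · rintro ⟨h1, h2⟩; exact ⟨by omega, h1⟩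

theorem scanAt_le (t : List Char) (m i : Nat) (q : List (List Char)) (r : Nat)
    {r' : Nat} {p : List Char} (h : scanAt t m i q r = some (r', p)) : r ≤ r' := by
  induction q generalizing r with
  | nil => simp [scanAt] at h
  | cons p0 rest ih =>
      unfold scanAt at h
      split at h
      · simp only [Option.some.injEq, Prod.mk.injEq] at h; omega
      · exact Nat.le_of_succ_le (ih (r + 1) h)

theorem scanAt_lt (t : List Char) (m i : Nat) (q : List (List Char)) (r : Nat)
    {r' : Nat} {p : List Char} (h : scanAt t m i q r = some (r', p)) : r' < r + q.length := by
  induction q generalizing r with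
  | nil => simp [scanAt] at h
  | cons p0 rest ih =>
      unfold scanAt at h
      split at h
      · simp only [Option.some.injEq, Prod.mk.injEq] at h
        simp only [List.length_cons]
        omega
      · have := ih (r + 1) h
        simp only [List.length_cons]
        omega

-- inner loop = first match among the first (br - r) remaining patterns
theorem altInner_eq (t : List Char) (m i : Nat) (q : List (List Char)) :
    ∀ (r : Nat) (br be : Int), (r : Int) ≤ br →
    altInner t m i r q (br, be) =
      match scanAt t m i (q.take (br - (r : Int)).toNat) r with
      | some (r', p) => ((r' : Int), (i : Int) + (p.length : Int))
      | none => (br, be) := by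
  induction q with
  | nil => intro r br be _; simp [altInner, scanAt]
  | cons p rest ih =>
      intro r br be hr
      unfold altInner
      by_cases hbr : br ≤ (r : Int)
      · have h0 : (br - (r : Int)).toNat = 0 := by omega
        simp [hbr, h0, scanAt]
      · have htake : (br - (r : Int)).toNat = (br - ((r : Int) + 1)).toNat + 1 := by omega
        rw [htake]
        simp only [List.take_succ_cons]
        by_cases hc : i + p.length ≤ m ∧ p.isPrefixOf (t.drop i)
        · rw [if_neg hbr]
          rw [show scanAt t m i (p :: rest.take (br - ((r : Int) + 1)).toNat) r
              = some (r, p) from by simp only [scanAt, if_pos hc]]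
          rw [if_pos hc]
        · rw [if_neg hbr, if_neg hc]
          rw [show scanAt t m i (p :: rest.take (br - ((r : Int) + 1)).toNat) r
              = scanAt t m i (rest.take (br - ((r : Int) + 1)).toNat) (r + 1) from by
            simp only [scanAt, if_neg hc]]
          rw [ih (r + 1) br be (by omega)]
          norm_num

-- one outer step, against the reference altSpec (induction on the pattern list)
theorem altSpec_step (t : List Char) (m i : Nat) (hi : i < m) :
    ∀ (l : List (List Char)) (be : Int) (r0 : Nat),
    altSpec (t.take m) (i + 1) l be =
      match scanAt t m i l r0 with
      | some (r', p) => altSpec (t.take m) i (l.take (r' - r0)) ((i : Int) + (p.length : Int))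
      | none => altSpec (t.take m) i l be := by
  intro l
  induction l with
  | nil => intro be r0; simp [scanAt, altSpec]
  | cons p rest ih =>
      intro be r0
      have hb := cond_bridge t p m i (le_of_lt hi)
      by_cases hc : i + p.length ≤ m ∧ p.isPrefixOf (t.drop i)
      · have hpre : p.isPrefixOf ((t.take m).drop i) = true := by
          rw [List.isPrefixOf_iff_prefix]; exact hb.mp hc
        rw [show scanAt t m i (p :: rest) r0 = some (r0, p) from by
          simp only [scanAt, if_pos hc]]
        dsimp only
        rw [Nat.sub_self, List.take_zero]
        simp only [altSpec]
        rw [show lastMatchBelow (t.take m) p (i + 1) =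
          (if p.isPrefixOf ((t.take m).drop i) then some i else lastMatchBelow (t.take m) p i) from rfl]
        rw [if_pos hpre]
      · have hpre : ¬ p.isPrefixOf ((t.take m).drop i) = true := fun h =>
          hc (hb.mpr (List.isPrefixOf_iff_prefix.mp h))
        rw [show scanAt t m i (p :: rest) r0 = scanAt t m i rest (r0 + 1) from by
          simp only [scanAt, if_neg hc]]
        have hlmb : lastMatchBelow (t.take m) p (i + 1) = lastMatchBelow (t.take m) p i := by
          rw [show lastMatchBelow (t.take m) p (i + 1) =
            (if p.isPrefixOf ((t.take m).drop i) then some i else lastMatchBelow (t.take m) p i) from rfl]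
          rw [if_neg hpre]
        cases hs : scanAt t m i rest (r0 + 1) with
        | none =>
            simp only [altSpec, hlmb]
            rw [ih be (r0 + 1), hs]
        | some rp =>
            obtain ⟨r', p'⟩ := rp
            have hge : r0 + 1 ≤ r' := scanAt_le t m i rest (r0 + 1) hs
            have htk : r' - r0 = (r' - (r0 + 1)) + 1 := by omega
            simp only [altSpec, hlmb, htk, List.take_succ_cons]
            cases hj : lastMatchBelow (t.take m) p i with
            | some j => rfl
            | none =>
                rw [ih be (r0 + 1), hs]

-- the whole reverse scan equals the reference over the still-allowed pattern prefix
theorem altScan_eq (t : List Char) (m : Nat) :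
    ∀ (i : Nat), i ≤ m → ∀ (br be : Int), 0 ≤ br → br ≤ (splitPatterns.length : Int) →
    (altScan t m i (br, be)).2 = altSpec (t.take m) i (splitPatterns.take br.toNat) be := by
  intro i
  induction i with
  | zero => intro _ br be _ _; simp [altScan, altSpec_zero]
  | succ i ih =>
      intro hi br be hbr0 hbr1
      unfold altScan
      rw [altInner_eq t m i splitPatterns 0 br be (by omega)]
      have h0 : (br - ((0 : Nat) : Int)).toNat = br.toNat := by omega
      rw [h0]
      rw [altSpec_step t m i (by omega) (splitPatterns.take br.toNat) be 0]
      cases hs : scanAt t m i (splitPatterns.take br.toNat) 0 with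
      | none => exact ih (by omega) br be hbr0 hbr1
      | some rp =>
          obtain ⟨r', p⟩ := rp
          dsimp only
          have hlt : r' < 0 + (splitPatterns.take br.toNat).length := scanAt_lt t m i _ 0 hs
          have hlen : (splitPatterns.take br.toNat).length ≤ br.toNat := by
            simp [List.length_take]
          have htk : (splitPatterns.take br.toNat).take (r' - 0) = splitPatterns.take r' := by
            rw [List.take_take]
            congr 1
            omega
          rw [htk]
          have hrec := ih (by omega) (r' : Int) ((i : Int) + (p.length : Int)) (by omega)
            (by have h2 : (splitPatterns.take br.toNat).length ≤ splitPatterns.length := by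
                  simp [List.length_take]
                omega)
          rw [hrec, Int.toNat_natCast]

-- A's pattern loop equals the reference at i = length of the prefix
theorem loopA_eq (text : List Char) (max_length : Int)
    (s : List Char) (hs : s = PySem.List.slice text none (some max_length)) :
    ∀ (ps : List (List Char)), (∀ p ∈ ps, p ≠ []) →
    findLoopA text max_length ps = altSpec s s.length ps (-1) := by
  intro ps
  induction ps with
  | nil => intro _; rfl
  | cons p rest ih =>
      intro hne
      have hp : p ≠ [] := hne p (by simp)
      rw [show findLoopA text max_length (p :: rest) =
        (if PySem.Chars.rfind (PySem.List.slice text none (some max_length)) p ≠ -1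
         then PySem.Chars.rfind (PySem.List.slice text none (some max_length)) p + (p.length : Int)
         else findLoopA text max_length rest) from rfl]
      rw [← hs, rfind_eq_lmb s p hp]
      cases hj : lastMatchBelow s p s.length with
      | some j =>
          have hne1 : optIdx (some j) ≠ -1 := by simp [optIdx]
          rw [if_pos hne1]
          simp only [altSpec, hj, optIdx]
      | none =>
          rw [if_neg (by simp [optIdx])]
          simp only [altSpec, hj]
          exact ih (fun q hq => hne q (by simp [hq]))

theorem slice_prefix (xs : List Char) (b : Int) :
    PySem.List.slice xs none (some b) <+: xs := by
  simp [PySem.List.slice]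
  exact List.take_prefix _ _

-- ===== VERDICT (by name: the statement is the Claim_ definition above) =====
theorem find_best_split_point_spec : Claim_equal_find_best_split_point := by
  intro text max_length _
  unfold Spec_find_best_split_point find_best_split_point find_best_split_point_alt
  split
  · rfl
  · set t := text.toList with ht
    set s := PySem.List.slice t none (some max_length) with hsdef
    have hpre : s <+: t := slice_prefix t max_length
    have hst : s = t.take s.length := by
      obtain ⟨u, hu⟩ := hpre
      rw [← hu]; simp
    rw [altScan_eq t s.length s.length (le_refl _) (splitPatterns.length : Int) (-1)
        (by positivity) (le_refl _)]
    rw [← hst]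
    have h12 : ((splitPatterns.length : Int)).toNat = splitPatterns.length := by simp
    rw [h12, List.take_length]
    exact loopA_eq t max_length s hsdef splitPatterns (by decide)
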